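-- pv_equiv track=rewrite | github.com/sahi7/Cremell | zMisc/utils.py | clean_request_data
-- ===== SOURCE A (Python) =====
-- def clean_request_data(request_data, fields_to_remove=None):
--     """
--     Removes specified fields and their _id variants from request data.
--     Default removes branch, restaurant, company and their _id variants.
--     """
--     default_fields = {'branch', 'restaurant', 'company', 'countries', 'branches','restaurants', 'companies'}
--     fields = fields_to_remove or default_fields
--
--     # Generate all field variants to remove
--     variants = set(fields)
--     for field in fields:
--         variants.update({f"{field}_id", f"{field}Id"})
--
--     # Return cleaned dict (preserves original request.data)
--     return {
--         k: v for k, v in request_data.items()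
--         if k not in variants
--     }
-- ===== SOURCE B (Python) =====
-- def clean_request_data(request_data, fields_to_remove=None):
--     """
--     Removes specified fields and their _id variants from request data.
--     Instead of enumerating all variants up front, each key is tested
--     directly: keep it unless it is a field, or it is a field plus an
--     '_id' / 'Id' suffix.
--     """
--     fields = set(fields_to_remove or ('branch', 'restaurant', 'company',
--                                       'countries', 'branches', 'restaurants',
--                                       'companies'))
--
--     def removable(k):
--         return (k in fields
--                 or (k.endswith('_id') and k[:-3] in fields)
--                 or (k.endswith('Id') and k[:-2] in fields))
--
--     return {k: v for k, v in request_data.items() if not removable(k)}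
-- ===== Notes on version B (the rewrite author's own statement) =====
-- stated objective: simpler
-- what changed: B drops A's variant-set construction loop (which materialises field, field_id and fieldId for every field) and instead tests each key directly by stripping an '_id'/'Id' suffix and checking the base against the field set.
import Mathlib
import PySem

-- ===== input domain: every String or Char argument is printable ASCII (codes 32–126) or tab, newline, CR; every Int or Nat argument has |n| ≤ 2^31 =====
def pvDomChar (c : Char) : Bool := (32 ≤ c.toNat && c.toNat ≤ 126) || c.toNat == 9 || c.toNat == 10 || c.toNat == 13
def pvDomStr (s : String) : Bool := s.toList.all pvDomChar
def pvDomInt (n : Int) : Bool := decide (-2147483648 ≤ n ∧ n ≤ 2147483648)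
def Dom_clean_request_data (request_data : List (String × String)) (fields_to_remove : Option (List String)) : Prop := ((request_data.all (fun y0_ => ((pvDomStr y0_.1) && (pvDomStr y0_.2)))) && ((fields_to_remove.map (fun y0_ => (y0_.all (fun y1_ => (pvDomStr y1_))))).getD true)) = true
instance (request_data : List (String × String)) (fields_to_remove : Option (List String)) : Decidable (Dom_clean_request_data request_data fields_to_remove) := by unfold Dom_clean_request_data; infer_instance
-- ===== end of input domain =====

-- B replaces A's variant-set construction loop by a direct per-key suffix test ('simpler' decomposition; same cost).


-- ===== PORT A =====
def pvDefaultFields : List String :=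
  ["branch", "restaurant", "company", "countries", "branches", "restaurants", "companies"]

def clean_request_data (request_data : List (String × String)) (fields_to_remove : Option (List String)) : List (String × String) :=
  -- fields = fields_to_remove or default_fields  (an empty list is falsy)
  let fields : List String :=
    match fields_to_remove with
    | none => pvDefaultFields
    | some l => if l.isEmpty then pvDefaultFields else l
  -- variants = set(fields); for field in fields: variants.update({field_id, fieldId})
  let variants : PySem.Set String :=
    fields.foldl (fun s f => PySem.Set.add (PySem.Set.add s (f ++ "_id")) (f ++ "Id"))
      (PySem.Set.ofList fields)
  request_data.filter (fun kv => !(PySem.Set.contains variants kv.1))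

-- ===== PORT B =====
def pvRemovable (fields : PySem.Set String) (k : String) : Bool :=
  PySem.Set.contains fields k
    || (PySem.Str.endswith k "_id" && PySem.Set.contains fields (PySem.Str.slice k none (some (-3))))
    || (PySem.Str.endswith k "Id" && PySem.Set.contains fields (PySem.Str.slice k none (some (-2))))

def clean_request_data_alt (request_data : List (String × String)) (fields_to_remove : Option (List String)) : List (String × String) :=
  let fields : PySem.Set String :=
    PySem.Set.ofList
      (match fields_to_remove with
       | none => ["branch", "restaurant", "company", "countries", "branches", "restaurants", "companies"]
       | some l => if l.isEmpty then ["branch", "restaurant", "company", "countries", "branches", "restaurants", "companies"] else l)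
  request_data.filter (fun kv => !(pvRemovable fields kv.1))

-- ===== PRECONDITION & SPEC =====
def Spec_clean_request_data (request_data : List (String × String)) (fields_to_remove : Option (List String)) (out : List (String × String)) : Prop := out = clean_request_data_alt request_data fields_to_remove
instance (request_data : List (String × String)) (fields_to_remove : Option (List String)) (out : List (String × String)) : Decidable (Spec_clean_request_data request_data fields_to_remove out) := by unfold Spec_clean_request_data; infer_instance

-- ===== CLAIM (what is proved, stated in full; the proofs are below) =====
def Claim_equal_clean_request_data : Prop := ∀ (request_data : List (String × String)) (fields_to_remove : Option (List String)), Dom_clean_request_data request_data fields_to_remove → Spec_clean_request_data request_data fields_to_remove (clean_request_data request_data fields_to_remove)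

-- ===== LEMMAS AND PROOFS =====

-- membership in A's variants set, characterised
lemma mem_variants (k : String) (fs : List String) (s0 : PySem.Set String) :
    k ∈ fs.foldl (fun s f => PySem.Set.add (PySem.Set.add s (f ++ "_id")) (f ++ "Id")) s0 ↔
      k ∈ s0 ∨ ∃ f ∈ fs, k = f ++ "_id" ∨ k = f ++ "Id" := by
  induction fs generalizing s0 with
  | nil => simp
  | cons f fs ih =>
      simp [List.foldl_cons, ih, PySem.Set.mem_add, or_assoc]

-- splitting a fixed suffix off a list equality
lemma eq_append_iff (k f t : List Char) :
    k = f ++ t ↔ t <:+ k ∧ f = k.take (k.length - t.length) := by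
  constructor
  · rintro rfl
    exact ⟨⟨f, rfl⟩, by simp⟩
  · rintro ⟨⟨u, rfl⟩, hf⟩
    simp at hf
    simp [hf]

-- the same, on strings
lemma str_eq_append_iff (k f t : String) :
    k = f ++ t ↔ (t.toList <:+ k.toList ∧ f = String.ofList (k.toList.take (k.length - t.length))) := by
  rw [show (k = f ++ t) ↔ (k.toList = f.toList ++ t.toList) by rw [← String.toList_inj]; simp,
      eq_append_iff]
  constructor
  · rintro ⟨h1, h2⟩
    refine ⟨h1, ?_⟩
    rw [← String.toList_inj]
    simpa using h2
  · rintro ⟨h1, h2⟩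
    refine ⟨h1, ?_⟩
    rw [h2]
    simp

lemma exists_suffix_iff (k t : String) (fs : List String) :
    (∃ f ∈ fs, k = f ++ t) ↔
      (t.toList <:+ k.toList ∧ String.ofList (k.toList.take (k.length - t.length)) ∈ fs) := by
  simp only [str_eq_append_iff]
  constructor
  · rintro ⟨f, hf, h1, rfl⟩
    exact ⟨h1, hf⟩
  · rintro ⟨h1, hm⟩
    exact ⟨_, hm, h1, rfl⟩

-- the per-key tests agree
lemma contains_variants_eq (fs : List String) (k : String) :
    PySem.Set.contains
      (fs.foldl (fun s f => PySem.Set.add (PySem.Set.add s (f ++ "_id")) (f ++ "Id"))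
        (PySem.Set.ofList fs)) k = pvRemovable (PySem.Set.ofList fs) k := by
  have hsl3 : PySem.Str.slice k none (some (-3)) = String.ofList (k.toList.take (k.length - 3)) := by
    rw [← String.toList_inj]
    simp
    rw [PySem.List.slice_to_neg_ofNat k.toList 3 (by omega)]
    simp
  have hsl2 : PySem.Str.slice k none (some (-2)) = String.ofList (k.toList.take (k.length - 2)) := by
    rw [← String.toList_inj]
    simp
    rw [PySem.List.slice_to_neg_ofNat k.toList 2 (by omega)]
    simp
  have e3 := exists_suffix_iff k "_id" fs
  have e2 := exists_suffix_iff k "Id" fs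
  rw [show ("_id".length) = 3 from rfl, ← hsl3] at e3
  rw [show ("Id".length) = 2 from rfl, ← hsl2] at e2
  rw [Bool.eq_iff_iff]
  simp only [pvRemovable, Bool.or_eq_true, Bool.and_eq_true, PySem.Set.contains_iff,
    PySem.Set.mem_ofList, PySem.Str.endswith_eq, PySem.Chars.endswith_iff, mem_variants, or_assoc]
  rw [← e3, ← e2]
  simp only [and_or_left, exists_or]

-- ===== VERDICT (by name: the statement is the Claim_ definition above) =====
theorem clean_request_data_spec : Claim_equal_clean_request_data := by
  intro rd ftr _
  unfold Spec_clean_request_data clean_request_data clean_request_data_alt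
  cases ftr with
  | none =>
      simp only [pvDefaultFields]
      exact List.filter_congr (fun kv _ => by rw [contains_variants_eq])
  | some l =>
      cases hl : l.isEmpty <;>
        · simp only [pvDefaultFields, hl, Bool.false_eq_true, if_true, if_false]
          exact List.filter_congr (fun kv _ => by rw [contains_variants_eq])
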